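-- pv_equiv track=rewrite | github.com/lucasphanpersonal/slay-the-spire-2-analyzer | analyzer/scraper.py | card_display_name
-- ===== SOURCE A (Python) =====
-- _CHARACTER_SUFFIXES: frozenset[str] = frozenset({
--     "IRONCLAD", "SILENT", "DEFECT", "WATCHER",
--     "NECROBINDER", "HUNTRESS",
-- })
--
-- def card_display_name(card_id: str) -> str:
--     """Convert card ID to a wiki-style display name.
--
--     Examples:
--         BASH              → Bash
--         SETUP_STRIKE      → Setup Strike
--         STRIKE_IRONCLAD   → Strike (Ironclad)
--         DEFEND_IRONCLAD   → Defend (Ironclad)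
--     """
--     parts = card_id.split("_")
--     # Check if the last word(s) are a character name
--     for i in range(len(parts), 0, -1):
--         suffix = "_".join(parts[i:]).upper() if i < len(parts) else ""
--         if suffix in _CHARACTER_SUFFIXES:
--             base = " ".join(p.title() for p in parts[:i])
--             char = suffix.title()
--             return f"{base} ({char})"
--     return " ".join(p.title() for p in parts)
-- ===== SOURCE B (Python) =====
-- _CHARACTER_SUFFIXES: frozenset[str] = frozenset({
--     "IRONCLAD", "SILENT", "DEFECT", "WATCHER",
--     "NECROBINDER", "HUNTRESS",
-- })
--
-- def card_display_name(card_id: str) -> str: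
--     # Since no character suffix contains '_', only the final part can ever match:
--     # one O(1) membership test replaces A's descending join-and-scan loop.
--     parts = card_id.split("_")
--     if len(parts) > 1 and parts[-1].upper() in _CHARACTER_SUFFIXES:
--         char = parts[-1].upper().title()
--         return " ".join(p.title() for p in parts[:-1]) + f" ({char})"
--     return " ".join(p.title() for p in parts)
-- ===== Notes on version B (the rewrite author's own statement) =====
-- stated objective: simpler
-- what changed: A scans all underscore-split suffixes from longest to shortest, joining and re-uppercasing each; since no character suffix contains an underscore, B replaces the whole loop with a single membership test on the last part (guarded by len(parts) > 1).
import Mathlib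
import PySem

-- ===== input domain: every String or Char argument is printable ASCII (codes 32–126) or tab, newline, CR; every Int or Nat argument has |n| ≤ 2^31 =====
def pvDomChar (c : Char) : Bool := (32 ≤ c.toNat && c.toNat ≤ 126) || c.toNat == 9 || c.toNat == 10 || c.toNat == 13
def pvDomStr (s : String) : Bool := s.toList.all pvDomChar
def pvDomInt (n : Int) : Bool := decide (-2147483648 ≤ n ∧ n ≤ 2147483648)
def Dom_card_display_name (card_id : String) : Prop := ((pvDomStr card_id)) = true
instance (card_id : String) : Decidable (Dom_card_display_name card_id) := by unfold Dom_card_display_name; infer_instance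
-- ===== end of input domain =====

-- B replaces A's descending join-and-rescan suffix loop by a single membership test on the
-- last '_'-part (no character suffix contains '_', so only the last part can ever match); objective: simpler.

-- ===== PORT A =====
-- shared helper: hand port of Python str.title (PySem has no title); exact on the ASCII domain,
-- where the cased characters are exactly the alphabetic ones.
def pvTitleGo : Bool → List Char → List Char
  | _, [] => []
  | prevCased, c :: rest =>
    if PySem.Chars.isalpha c then
      (if prevCased then PySem.Chars.lowerChar c else PySem.Chars.upperChar c) :: pvTitleGo true rest
    else c :: pvTitleGo false rest

def pvTitle (s : List Char) : List Char := pvTitleGo false s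

-- the frozenset of character suffixes (membership test only, so a list of its elements)
def pvSuffixes : List (List Char) :=
  ["IRONCLAD".toList, "SILENT".toList, "DEFECT".toList, "WATCHER".toList,
   "NECROBINDER".toList, "HUNTRESS".toList]

-- A's for-loop over range(len(parts), 0, -1); the trailing `return` is the [] case
def pvALoop (parts : List (List Char)) : List Int → List Char
  | [] => PySem.Chars.join [' '] (parts.map pvTitle)
  | i :: rest =>
    let suffix :=
      if i < (parts.length : Int) then
        PySem.Chars.upper (PySem.Chars.join ['_'] (PySem.List.slice parts (some i) none))
      else []
    if pvSuffixes.contains suffix then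
      PySem.Chars.join [' '] ((PySem.List.slice parts none (some i)).map pvTitle)
        ++ (' ' :: '(' :: (pvTitle suffix ++ [')']))
    else pvALoop parts rest

def card_display_name (card_id : String) : String :=
  let parts := PySem.Chars.splitOn card_id.toList ['_']
  String.ofList (pvALoop parts (PySem.List.pyRange (parts.length : Int) 0 (-1)))

-- ===== PORT B =====
def card_display_name_alt (card_id : String) : String :=
  let parts := PySem.Chars.splitOn card_id.toList ['_']
  if parts.length > 1 &&
      pvSuffixes.contains (PySem.Chars.upper (PySem.List.pyGetD parts (-1) [])) then
    let char := pvTitle (PySem.Chars.upper (PySem.List.pyGetD parts (-1) []))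
    String.ofList (PySem.Chars.join [' '] ((PySem.List.slice parts none (some (-1))).map pvTitle)
      ++ (' ' :: '(' :: (char ++ [')'])))
  else
    String.ofList (PySem.Chars.join [' '] (parts.map pvTitle))

-- ===== PRECONDITION & SPEC =====
def Spec_card_display_name (card_id : String) (out : String) : Prop := out = card_display_name_alt card_id
instance (card_id : String) (out : String) : Decidable (Spec_card_display_name card_id out) := by unfold Spec_card_display_name; infer_instance

-- ===== CLAIM (what is proved, stated in full; the proofs are below) =====
def Claim_equal_card_display_name : Prop := ∀ (card_id : String), Dom_card_display_name card_id → Spec_card_display_name card_id (card_display_name card_id)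

-- ===== LEMMAS AND PROOFS =====

lemma pvSuffixes_no_underscore (s : List Char) (h : '_' ∈ s) : pvSuffixes.contains s = false := by
  by_contra hc
  have hs : s ∈ pvSuffixes := by
    simpa [List.contains_iff_mem] using (Bool.not_eq_false _).mp hc
  simp [pvSuffixes] at hs
  rcases hs with h1 | h1 | h1 | h1 | h1 | h1 <;> subst h1 <;> revert h <;> decide

lemma pvUnderscore_mem_upper (s : List Char) (h : '_' ∈ s) : '_' ∈ PySem.Chars.upper s := by
  have hu : PySem.Chars.upper s = s.map PySem.Chars.upperChar := rfl
  rw [hu]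
  exact List.mem_map.mpr ⟨'_', h, by decide⟩

-- aLoop over indices 1 ≤ i ≤ len-2 never matches (the joined suffix contains '_')
lemma pvALoop_noMatch (parts : List (List Char)) (l : List Int)
    (hb : ∀ i ∈ l, 0 < i ∧ i ≤ (parts.length : Int) - 2) :
    pvALoop parts l = PySem.Chars.join [' '] (parts.map pvTitle) := by
  induction l with
  | nil => rfl
  | cons i rest ih =>
    obtain ⟨hi0, hi2⟩ := hb i (List.mem_cons_self ..)
    have hiN : (i.toNat : Int) = i := Int.toNat_of_nonneg (le_of_lt hi0)
    have hlt : i < (parts.length : Int) := by omega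
    have hlen : 2 ≤ (parts.drop i.toNat).length := by
      rw [List.length_drop]; omega
    obtain ⟨a, b, r, hd⟩ : ∃ a b r, parts.drop i.toNat = a :: b :: r := by
      rcases h1 : parts.drop i.toNat with _ | ⟨a, t⟩
      · rw [h1] at hlen; simp at hlen
      · rcases h2 : t with _ | ⟨b, r⟩
        · rw [h1, h2] at hlen; simp at hlen
        · exact ⟨a, b, r, rfl⟩
    have hund : '_' ∈ PySem.Chars.upper (PySem.Chars.join ['_'] (PySem.List.slice parts (some i) none)) := by
      apply pvUnderscore_mem_upper
      rw [PySem.List.slice_from _ (le_of_lt hi0), hd, PySem.Chars.join_cons_cons]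
      simp
    simp only [pvALoop, if_pos hlt, pvSuffixes_no_underscore _ hund, Bool.false_eq_true,
      if_false]
    exact ih (fun j hj => hb j (List.mem_cons_of_mem _ hj))

theorem pvKey (parts : List (List Char)) :
    pvALoop parts (PySem.List.pyRange (parts.length : Int) 0 (-1)) =
      (if parts.length > 1 &&
          pvSuffixes.contains (PySem.Chars.upper (PySem.List.pyGetD parts (-1) [])) then
        PySem.Chars.join [' '] ((PySem.List.slice parts none (some (-1))).map pvTitle)
          ++ (' ' :: '(' :: (pvTitle (PySem.Chars.upper (PySem.List.pyGetD parts (-1) [])) ++ [')']))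
      else PySem.Chars.join [' '] (parts.map pvTitle)) := by
  rcases List.eq_nil_or_concat parts with rfl | ⟨ys, x, rfl⟩
  · rfl
  · simp only [List.concat_eq_append]
    have hlen : (ys ++ [x]).length = ys.length + 1 := by simp
    have hpos : (0 : Int) < ((ys ++ [x]).length : Int) := by rw [hlen]; exact_mod_cast Nat.succ_pos _
    rw [PySem.List.pyRange_neg_one_cons hpos]
    have hnoth : ¬ (((ys ++ [x]).length : Int) < ((ys ++ [x]).length : Int)) := lt_irrefl _
    simp only [pvALoop, if_neg hnoth]
    have hempty : pvSuffixes.contains ([] : List Char) = false := by decide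
    rw [hempty]
    simp only [Bool.false_eq_true, if_false]
    rcases ys with _ | ⟨y, ys'⟩
    · -- one part: remaining range is empty, both sides fall back
      norm_num [pvALoop, PySem.List.pyRange_neg_one_eq_nil]
    · set ys := y :: ys' with hys
      have hm1 : (0 : Int) < ((ys ++ [x]).length : Int) - 1 := by
        rw [hlen]; push_cast; simp [hys]
      rw [PySem.List.pyRange_neg_one_cons hm1]
      have hlt : ((ys ++ [x]).length : Int) - 1 < ((ys ++ [x]).length : Int) := by omega
      have htn : (((ys ++ [x]).length : Int) - 1).toNat = ys.length := by
        rw [hlen]; push_cast; omega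
      have hdrop : PySem.List.slice (ys ++ [x]) (some (((ys ++ [x]).length : Int) - 1)) none = [x] := by
        rw [PySem.List.slice_from _ (by omega), htn, List.drop_left]
      have htake : PySem.List.slice (ys ++ [x]) none (some (((ys ++ [x]).length : Int) - 1)) = ys := by
        rw [PySem.List.slice_to _ (by omega), htn, List.take_left]
      have hget : PySem.List.pyGetD (ys ++ [x]) (-1) [] = x := by
        simp [PySem.List.pyGetD, PySem.List.pyGet?, PySem.List.pyIdx?]
      have hdl : PySem.List.slice (ys ++ [x]) none (some (-1)) = ys := by
        simp [PySem.List.slice]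
      have hguard : ((ys ++ [x]).length > 1) = True := by
        simp [hys]
      simp only [pvALoop, if_pos hlt, hdrop, PySem.Chars.join_singleton, hget, hdl, htake,
        hguard, decide_true, Bool.true_and]
      by_cases hc : pvSuffixes.contains (PySem.Chars.upper x) = true
      · rw [hc]; simp
      · rw [Bool.not_eq_true] at hc
        rw [hc]
        simp only [Bool.false_eq_true, if_false]
        apply pvALoop_noMatch
        intro i hi
        rw [PySem.List.mem_pyRange_neg_one] at hi
        omega

-- ===== VERDICT (by name: the statement is the Claim_ definition above) =====
theorem card_display_name_spec : Claim_equal_card_display_name := by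
  intro card_id _
  unfold Spec_card_display_name card_display_name card_display_name_alt
  simp only [pvKey, apply_ite String.ofList]
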